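-- pv_equiv track=rewrite | github.com/ngiengkianyew/daily-coding-problem | solutions/problem_231.py | rearrange
-- ===== SOURCE A (Python) =====
-- from collections import Counter
-- from queue import Queue
--
-- def rearrange(string):
--     c = Counter(string)
--     sitems = sorted(c.items(), key=lambda x: x[1], reverse=True)
--
--     strlen = len(string)
--     if strlen % 2:
--         if sitems[0][1] > (strlen // 2) + 1:
--             return None
--     else:
--         if sitems[0][1] > (strlen // 2):
--             return None
--
--     q = Queue()
--     for item in sitems:
--         q.put(item)
--
--     new_str = ""
--     while not q.empty():
--         item = q.get()
--         new_str += item[0]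
--         item = (item[0], item[1] - 1)
--         if item[1]:
--             q.put(item)
--
--     return new_str
-- ===== SOURCE B (Python) =====
-- from collections import Counter
--
--
-- def rearrange(string):
--     c = Counter(string)
--     sitems = sorted(c.items(), key=lambda x: x[1], reverse=True)
--
--     strlen = len(string)
--     if strlen % 2:
--         if sitems[0][1] > (strlen // 2) + 1:
--             return None
--     else:
--         if sitems[0][1] > (strlen // 2):
--             return None
--
--     out = []
--     for r in range(sitems[0][1]):
--         for ch, f in sitems:
--             if f > r:
--                 out.append(ch)
--     return ''.join(out)
-- ===== Notes on version B (the rewrite author's own statement) =====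
-- stated objective: faster
-- what changed: Replaces the FIFO queue simulation (dequeue, emit, decrement, re-enqueue, building the result by string +=) with a nested rounds loop over the fixed sorted counter items: round r appends every char whose frequency exceeds r, joined once at the end; no queue is maintained.
import Mathlib
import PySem

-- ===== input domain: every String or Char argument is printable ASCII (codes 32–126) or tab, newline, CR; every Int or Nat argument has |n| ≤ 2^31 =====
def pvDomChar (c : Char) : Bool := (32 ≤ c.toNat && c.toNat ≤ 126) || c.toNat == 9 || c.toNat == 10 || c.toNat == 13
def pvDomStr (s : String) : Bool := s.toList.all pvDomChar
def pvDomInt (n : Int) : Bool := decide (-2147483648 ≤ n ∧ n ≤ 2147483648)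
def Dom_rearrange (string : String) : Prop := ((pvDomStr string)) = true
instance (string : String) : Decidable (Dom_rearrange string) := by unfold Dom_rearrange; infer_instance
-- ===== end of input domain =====

-- B replaces A's FIFO dequeue/re-enqueue simulation by a nested rounds loop over the fixed
-- sorted counter items (round r emits every char with frequency > r); same return values.
-- Pre_ excludes only the empty string, on which both Pythons raise IndexError.

-- ===== PORT A =====
-- shared by both ports: both Pythons compute c = Counter(string) and
-- sitems = sorted(c.items(), key=lambda x: x[1], reverse=True) with identical code
def pvSitems (string : String) : List (Char × Int) :=
  PySem.List.sorted (PySem.Dict.counter string.toList).items (fun x => x.2) true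

-- the while-loop over the queue; fuel only makes the recursion structural (the loop runs
-- exactly sum-of-counts iterations, which is the fuel supplied)
def pvQloop : Nat → List (Char × Int) → List Char → List Char
  | 0, _, acc => acc
  | _ + 1, [], acc => acc
  | fuel + 1, (ch, f) :: rest, acc =>
      if f - 1 ≠ 0 then pvQloop fuel (rest ++ [(ch, f - 1)]) (acc ++ [ch])
      else pvQloop fuel rest (acc ++ [ch])

def rearrange (string : String) : Option String :=
  let sitems := pvSitems string
  let strlen : Int := PySem.Str.len string
  match sitems with
  | [] => none   -- Python: sitems[0] raises IndexError here (excluded by Pre_)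
  | top :: _ =>
    if PySem.Int.mod strlen 2 ≠ 0 then
      if top.2 > PySem.Int.floordiv strlen 2 + 1 then none
      else some (String.ofList (pvQloop ((sitems.map (fun p => p.2.toNat)).sum) sitems []))
    else
      if top.2 > PySem.Int.floordiv strlen 2 then none
      else some (String.ofList (pvQloop ((sitems.map (fun p => p.2.toNat)).sum) sitems []))

-- ===== PORT B =====
def pvRounds (sitems : List (Char × Int)) (n0 : Int) : List Char :=
  (PySem.List.pyRange 0 n0 1).foldl
    (fun out r => sitems.foldl (fun out p => if r < p.2 then out ++ [p.1] else out) out) []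

def rearrange_alt (string : String) : Option String :=
  let sitems := pvSitems string
  let strlen : Int := PySem.Str.len string
  match sitems with
  | [] => none   -- Python: sitems[0] raises IndexError here (excluded by Pre_)
  | top :: _ =>
    if PySem.Int.mod strlen 2 ≠ 0 then
      if top.2 > PySem.Int.floordiv strlen 2 + 1 then none
      else some (String.ofList (pvRounds sitems top.2))
    else
      if top.2 > PySem.Int.floordiv strlen 2 then none
      else some (String.ofList (pvRounds sitems top.2))

-- ===== PRECONDITION & SPEC =====
-- Pre_ excludes exactly the empty string: there both Pythons raise IndexError on sitems[0]
def Pre_rearrange (string : String) : Prop := string ≠ ""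
instance (string : String) : Decidable (Pre_rearrange string) := by unfold Pre_rearrange; infer_instance
def pvWitness_rearrange : String := "aabc"

def Spec_rearrange (string : String) (out : Option String) : Prop := out = rearrange_alt string
instance (string : String) (out : Option String) : Decidable (Spec_rearrange string out) := by unfold Spec_rearrange; infer_instance

-- ===== CLAIM (what is proved, stated in full; the proofs are below) =====
def Claim_equal_rearrange : Prop := ∀ (string : String), Dom_rearrange string → Pre_rearrange string → Spec_rearrange string (rearrange string)

-- ===== LEMMAS AND PROOFS =====

-- one full round of the queue: every item emitted once, survivors re-queued decremented
def pvDec (q : List (Char × Int)) : List (Char × Int) :=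
  q.filterMap (fun p => if p.2 - 1 ≠ 0 then some (p.1, p.2 - 1) else none)

theorem pvQloop_round (q : List (Char × Int)) : ∀ (t : List (Char × Int)) (acc : List Char) (fuel : Nat),
    pvQloop (fuel + q.length) (q ++ t) acc = pvQloop fuel (t ++ pvDec q) (acc ++ q.map (·.1)) := by
  induction q with
  | nil => intro t acc fuel; simp [pvDec]
  | cons p q ih =>
    intro t acc fuel
    obtain ⟨ch, f⟩ := p
    have hlen : fuel + ((ch, f) :: q).length = (fuel + q.length) + 1 := by simp; omega
    rw [hlen]
    by_cases hf : f - 1 ≠ 0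
    · simp only [List.cons_append, pvQloop, if_pos hf]
      rw [show q ++ t ++ [(ch, f - 1)] = q ++ (t ++ [(ch, f - 1)]) by simp, ih]
      simp [pvDec, hf]
    · simp only [List.cons_append, pvQloop, if_neg hf]
      rw [ih]
      simp [pvDec, hf]

theorem pvQloop_round' (q : List (Char × Int)) (acc : List Char) (fuel : Nat) :
    pvQloop (fuel + q.length) q acc = pvQloop fuel (pvDec q) (acc ++ q.map (·.1)) := by
  have := pvQloop_round q [] acc fuel
  simpa using this

theorem pvDec_sum (q : List (Char × Int)) (h : ∀ p ∈ q, 1 ≤ p.2) :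
    (q.map (fun p => p.2.toNat)).sum = q.length + ((pvDec q).map (fun p => p.2.toNat)).sum := by
  induction q with
  | nil => simp [pvDec]
  | cons p q ih =>
    have hp : 1 ≤ p.2 := h p (by simp)
    have hq := ih (fun x hx => h x (by simp [hx]))
    by_cases hf : p.2 - 1 ≠ 0
    · simp only [pvDec, List.filterMap_cons, if_pos hf] at *
      simp only [List.map_cons, List.sum_cons, List.length_cons]
      omega
    · simp only [pvDec, List.filterMap_cons, if_neg hf] at *
      simp only [List.map_cons, List.sum_cons, List.length_cons]
      omega

theorem pvDec_filter_map (r : Nat) (q : List (Char × Int)) (h : ∀ p ∈ q, 1 ≤ p.2) :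
    ((pvDec q).filter (fun p => (r : Int) < p.2)).map (·.1)
      = (q.filter (fun p => ((r + 1 : Nat) : Int) < p.2)).map (·.1) := by
  induction q with
  | nil => simp [pvDec]
  | cons p q ih =>
    have hp : 1 ≤ p.2 := h p (by simp)
    have hq := ih (fun x hx => h x (by simp [hx]))
    by_cases hf : p.2 - 1 ≠ 0
    · simp only [pvDec, List.filterMap_cons, if_pos hf]
      by_cases hr : (r : Int) < p.2 - 1
      · rw [List.filter_cons_of_pos (by simpa using hr), List.filter_cons_of_pos (by push_cast; simp; omega)]
        simpa [pvDec] using hq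
      · rw [List.filter_cons_of_neg (by simpa using hr), List.filter_cons_of_neg (by push_cast; simp; omega)]
        simpa [pvDec] using hq
    · simp only [pvDec, List.filterMap_cons, if_neg hf]
      rw [List.filter_cons_of_neg (by push_cast; simp; omega)]
      simpa [pvDec] using hq

-- the queue simulation emits, round after round, the chars whose count exceeds the round index
theorem pvQloop_eq_flatMap : ∀ (n : Nat) (q : List (Char × Int)) (acc : List Char),
    (∀ p ∈ q, 1 ≤ p.2 ∧ p.2 ≤ (n : Int)) →
    pvQloop ((q.map (fun p => p.2.toNat)).sum) q acc
      = acc ++ (List.range n).flatMap (fun (r : Nat) => (q.filter (fun p => ((r : Nat) : Int) < p.2)).map (·.1)) := by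
  intro n
  induction n with
  | zero =>
    intro q acc h
    have hq : q = [] := by
      cases q with
      | nil => rfl
      | cons p q => exact absurd (h p (by simp)) (by simp; omega)
    subst hq
    simp [pvQloop]
  | succ n ih =>
    intro q acc h
    cases hq : q with
    | nil => simp [pvQloop]
    | cons p0 q0 =>
      rw [← hq]
      have hne : q.length ≠ 0 := by rw [hq]; simp
      have h1 : ∀ x ∈ q, 1 ≤ x.2 := fun x hx => (h x hx).1
      have hdec : ∀ x ∈ pvDec q, 1 ≤ x.2 ∧ x.2 ≤ (n : Int) := by
        intro x hx
        simp only [pvDec, List.mem_filterMap] at hx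
        obtain ⟨p, hp, hpx⟩ := hx
        by_cases hf : p.2 - 1 ≠ 0
        · rw [if_pos hf] at hpx
          have hb := h p hp
          cases hpx
          refine ⟨by omega, ?_⟩
          have := hb.2
          push_cast at this ⊢
          omega
        · rw [if_neg hf] at hpx
          exact absurd hpx (by simp)
      rw [pvDec_sum q h1, Nat.add_comm, pvQloop_round']
      rw [ih (pvDec q) (acc ++ q.map (·.1)) hdec]
      have h0 : (q.filter (fun p => (0 : Int) < p.2)).map (·.1) = q.map (·.1) := by
        rw [List.filter_eq_self.mpr (fun x hx => by
          have := h1 x hx; simp; omega)]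
      have hr : ∀ r ∈ List.range n, ((pvDec q).filter (fun p => (r : Int) < p.2)).map (·.1)
          = (q.filter (fun p => ((r + 1 : Nat) : Int) < p.2)).map (·.1) :=
        fun r _ => pvDec_filter_map r q h1
      rw [List.flatMap_congr hr, List.range_succ_eq_map]
      simp only [List.flatMap_cons, Nat.cast_zero, List.flatMap_map,
        Nat.succ_eq_add_one, h0, List.append_assoc]

theorem pvSitems_pos (string : String) :
    ∀ p ∈ pvSitems string, 1 ≤ p.2 := by
  intro p hp
  rw [pvSitems, PySem.List.mem_sorted, PySem.Dict.items_counter] at hp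
  simp only [List.mem_map] at hp
  obtain ⟨k, hk, rfl⟩ := hp
  rw [PySem.Set.mem_ofList] at hk
  simpa using List.count_pos_iff.mpr hk

-- B's nested loops, accumulated: each round appends its filtered chunk
theorem pvFoldRounds (s : List (Char × Int)) : ∀ (l : List Nat) (acc : List Char),
    l.foldl (fun out k => s.foldl (fun out p => if ((k : Nat) : Int) < p.2 then out ++ [p.1] else out) out) acc
      = acc ++ l.flatMap (fun k => (s.filter (fun p => ((k : Nat) : Int) < p.2)).map (·.1)) := by
  intro l
  induction l with
  | nil => simp
  | cons k l ih =>
    intro acc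
    simp only [List.foldl_cons, List.flatMap_cons]
    rw [show (s.foldl (fun out p => if ((k : Nat) : Int) < p.2 then out ++ [p.1] else out) acc)
          = acc ++ (s.filter (fun p => ((k : Nat) : Int) < p.2)).map (·.1) from by
        have := PySem.List.foldl_append_if (fun p : Char × Int => decide (((k : Nat) : Int) < p.2))
          (·.1) s acc
        simpa using this, ih]
    simp

-- the two loops agree on any nonempty list of positive counts whose head count is maximal
theorem pvLoops_agree (s : List (Char × Int)) (top : Char × Int)
    (hpos : ∀ p ∈ s, 1 ≤ p.2) (hmax : ∀ p ∈ s, p.2 ≤ top.2) (htop : 1 ≤ top.2) :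
    pvQloop ((s.map (fun p => p.2.toNat)).sum) s [] = pvRounds s top.2 := by
  have hbound : ∀ p ∈ s, 1 ≤ p.2 ∧ p.2 ≤ ((top.2.toNat : Nat) : Int) := by
    intro p hp
    refine ⟨hpos p hp, ?_⟩
    have := hmax p hp
    omega
  rw [pvQloop_eq_flatMap top.2.toNat s [] hbound]
  rw [pvRounds, PySem.List.pyRange_one, List.foldl_map,
      show (top.2 - 0).toNat = top.2.toNat by omega]
  simp only [zero_add, List.nil_append]
  rw [pvFoldRounds s (List.range top.2.toNat) []]
  simp

-- ===== VERDICT (by name: the statement is the Claim_ definition above) =====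
theorem rearrange_spec : Claim_equal_rearrange := by
  intro string _ hpre
  unfold Spec_rearrange rearrange rearrange_alt
  cases hs : pvSitems string with
  | nil =>
    exfalso
    apply hpre
    rw [pvSitems, PySem.List.sorted_eq_nil_iff, PySem.Dict.items_counter,
        List.map_eq_nil_iff] at hs
    have hnil : string.toList = [] := by
      cases hl : string.toList with
      | nil => rfl
      | cons c cs =>
        have hc : c ∈ PySem.Set.ofList string.toList :=
          (PySem.Set.mem_ofList string.toList c).mpr (by rw [hl]; exact List.mem_cons_self)
        rw [hs] at hc
        exact absurd hc (List.not_mem_nil)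
    simpa using hnil
  | cons top t =>
    have hpos : ∀ p ∈ (top :: t), 1 ≤ p.2 := by rw [← hs]; exact pvSitems_pos string
    have hmax : ∀ p ∈ (top :: t), p.2 ≤ top.2 := by
      intro p hp
      rw [← hs] at hp
      exact PySem.List.key_head_sorted_rev_ge
        (PySem.Dict.counter string.toList).items (fun x => x.2) hs
        p ((PySem.List.mem_sorted _ _ _ _).mp hp)
    simp only
    rw [pvLoops_agree (top :: t) top hpos hmax (hpos top (by simp))]
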